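-- pv_equiv track=rewrite | github.com/Nuttymoon/advent-of-code | 2025/03/part_two.py | find_best_couple
-- ===== SOURCE A (Python) =====
-- def find_best_couple(line):
--     best_tens_digit = 0
--     best_tens_digit_index = 0
--     best_ones_digit = 0
--
--     for d in range(0, len(line) - 1):
--         if int(line[d]) > best_tens_digit:
--             best_tens_digit = int(line[d])
--             best_tens_digit_index = d
--
--     for d in range(best_tens_digit_index + 1, len(line)):
--         if int(line[d]) > best_ones_digit:
--             best_ones_digit = int(line[d])
--
--     return best_tens_digit * 10 + best_ones_digit
-- ===== SOURCE B (Python) =====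
-- def find_best_couple(line):
--     best = 0
--     running_max_tens = 0
--     for j in range(1, len(line)):
--         tens = int(line[j - 1])
--         if tens > running_max_tens:
--             running_max_tens = tens
--         couple = running_max_tens * 10 + int(line[j])
--         if couple > best:
--             best = couple
--     return best
-- ===== Notes on version B (the rewrite author's own statement) =====
-- stated objective: alternative
-- what changed: Replaces A's two dependent scans (argmax of the tens digit with index bookkeeping, then a rescan of the suffix after that index) by a single left-to-right pass that threads a running prefix-max tens digit and the best pair value.
import Mathlib
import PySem

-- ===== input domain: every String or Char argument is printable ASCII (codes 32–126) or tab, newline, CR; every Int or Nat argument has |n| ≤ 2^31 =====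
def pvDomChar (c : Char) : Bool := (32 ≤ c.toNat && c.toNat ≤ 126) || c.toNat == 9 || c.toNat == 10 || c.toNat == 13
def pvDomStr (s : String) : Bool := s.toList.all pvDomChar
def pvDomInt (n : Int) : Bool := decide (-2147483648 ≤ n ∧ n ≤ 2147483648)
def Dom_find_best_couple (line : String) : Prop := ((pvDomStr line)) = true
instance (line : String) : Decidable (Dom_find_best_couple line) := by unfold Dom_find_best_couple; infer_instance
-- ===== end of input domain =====

-- B replaces A's two dependent scans by one pass with a running prefix-max; equal return value on all digit strings (and length ≤ 1), proved below.

-- int(line[d]) for an index the loops keep in range; Pre_ guarantees the char is a digit,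
-- so the `getD 0` default is never taken on admitted inputs (Python raises exactly where the Option is none).
def pvDigit (line : String) (d : Int) : Int :=
  ((PySem.Str.pyGet? line d).bind (fun c => PySem.Int.ofChars? [c])).getD 0

-- ===== PORT A =====
def find_best_couple (line : String) : Int :=
  let n : Int := PySem.Str.len line
  -- for d in range(0, len(line) - 1): track (best_tens_digit, best_tens_digit_index)
  let st :=
    (PySem.List.pyRange 0 (n - 1) 1).foldl
      (fun (st : Int × Int) d => if pvDigit line d > st.1 then (pvDigit line d, d) else st)
      (0, 0)
  -- for d in range(best_tens_digit_index + 1, len(line)): track best_ones_digit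
  let best_ones :=
    (PySem.List.pyRange (st.2 + 1) n 1).foldl
      (fun acc d => if pvDigit line d > acc then pvDigit line d else acc) 0
  st.1 * 10 + best_ones

-- ===== PORT B =====
def find_best_couple_alt (line : String) : Int :=
  let n : Int := PySem.Str.len line
  -- one pass: state (running_max_tens, best)
  let st :=
    (PySem.List.pyRange 1 n 1).foldl
      (fun (st : Int × Int) j =>
        let tens := pvDigit line (j - 1)
        let rm := if tens > st.1 then tens else st.1
        let couple := rm * 10 + pvDigit line j
        (rm, if couple > st.2 then couple else st.2))
      (0, 0)
  st.2

-- ===== PRECONDITION & SPEC =====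
-- Pre_ excludes exactly the inputs where A raises ValueError: strings of length ≥ 2
-- containing a non-digit character (int() fails on the char; B raises there too).
def Pre_find_best_couple (line : String) : Prop :=
  PySem.Str.len line ≤ 1 ∨ PySem.Str.strIsdigit line = true
instance (line : String) : Decidable (Pre_find_best_couple line) := by
  unfold Pre_find_best_couple; infer_instance

def pvWitness_find_best_couple : String := "2719"

def Spec_find_best_couple (line : String) (out : Int) : Prop := out = find_best_couple_alt line
instance (line : String) (out : Int) : Decidable (Spec_find_best_couple line out) := by
  unfold Spec_find_best_couple; infer_instance

-- ===== CLAIM (what is proved, stated in full; the proofs are below) =====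
def Claim_equal_find_best_couple : Prop := ∀ (line : String), Dom_find_best_couple line → Pre_find_best_couple line → Spec_find_best_couple line (find_best_couple line)

-- ===== LEMMAS AND PROOFS =====

-- `max(acc, f d)`-style loop of A's second scan / the running maxima, with general bounds.
def pvMloop (f : Int → Int) (a b : Int) : Int :=
  (PySem.List.pyRange a b 1).foldl (fun acc d => if f d > acc then f d else acc) 0

-- A's first scan: (best_tens_digit, best_tens_digit_index).
def pvTloop (f : Int → Int) (b : Int) : Int × Int :=
  (PySem.List.pyRange 0 b 1).foldl
    (fun (st : Int × Int) d => if f d > st.1 then (f d, d) else st) (0, 0)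

-- B's single pass: (running_max_tens, best).
def pvBloop (f : Int → Int) (b : Int) : Int × Int :=
  (PySem.List.pyRange 1 b 1).foldl
    (fun (st : Int × Int) j =>
      let tens := f (j - 1)
      let rm := if tens > st.1 then tens else st.1
      let couple := rm * 10 + f j
      (rm, if couple > st.2 then couple else st.2))
    (0, 0)

theorem pv_int_le_or_lt (a b : Int) : a ≤ b ∨ b < a := by omega

theorem pv_mloop_nil (f : Int → Int) (a b : Int) (h : b ≤ a) : pvMloop f a b = 0 := by
  simp [pvMloop, PySem.List.pyRange_one_eq_nil h]

theorem pv_mloop_succ (f : Int → Int) (a b : Int) (h : a ≤ b) :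
    pvMloop f a (b + 1) = if f b > pvMloop f a b then f b else pvMloop f a b := by
  unfold pvMloop
  rw [PySem.List.pyRange_one_succ_right h, List.foldl_append]
  simp

theorem pv_mloop_nonneg (f : Int → Int) (a b : Int) : 0 ≤ pvMloop f a b := by
  rcases pv_int_le_or_lt b a with h | h
  · rw [pv_mloop_nil f a b h]
  · obtain ⟨k, rfl⟩ : ∃ k : Nat, b = a + k := ⟨(b - a).toNat, by omega⟩
    clear h
    induction k with
    | zero => simp [pv_mloop_nil f a a le_rfl]
    | succ k ih =>
        have e : (a + ((k : Nat) + 1 : Nat) : Int) = (a + k) + 1 := by push_cast; ring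
        rw [e, pv_mloop_succ f a (a + k) (by omega)]
        split <;> omega

theorem pv_mloop_mono (f : Int → Int) (a b b' : Int) (hab : a ≤ b) (hbb : b ≤ b') :
    pvMloop f a b ≤ pvMloop f a b' := by
  obtain ⟨k, rfl⟩ : ∃ k : Nat, b' = b + k := ⟨(b' - b).toNat, by omega⟩
  clear hbb
  induction k with
  | zero => simp
  | succ k ih =>
      have e : (b + ((k : Nat) + 1 : Nat) : Int) = (b + k) + 1 := by push_cast; ring
      rw [e, pv_mloop_succ f a (b + k) (by omega)]
      split <;> omega

theorem pv_le_mloop (f : Int → Int) (a b d : Int) (h1 : a ≤ d) (h2 : d < b) :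
    f d ≤ pvMloop f a b := by
  obtain ⟨k, rfl⟩ : ∃ k : Nat, b = (d + 1) + k := ⟨(b - (d + 1)).toNat, by omega⟩
  clear h2
  induction k with
  | zero =>
      simp only [Nat.cast_zero, add_zero]
      rw [pv_mloop_succ f a d h1]
      split <;> omega
  | succ k ih =>
      have e : (d + 1 + ((k : Nat) + 1 : Nat) : Int) = (d + 1 + k) + 1 := by push_cast; ring
      rw [e, pv_mloop_succ f a (d + 1 + k) (by omega)]
      split <;> omega

theorem pv_mloop_cases (f : Int → Int) (a b : Int) :
    pvMloop f a b = 0 ∨ ∃ d, a ≤ d ∧ d < b ∧ pvMloop f a b = f d := by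
  rcases pv_int_le_or_lt b a with h | h
  · exact Or.inl (pv_mloop_nil f a b h)
  · obtain ⟨k, rfl⟩ : ∃ k : Nat, b = a + k := ⟨(b - a).toNat, by omega⟩
    clear h
    induction k with
    | zero => exact Or.inl (by simp [pv_mloop_nil f a a le_rfl])
    | succ k ih =>
        have e : (a + ((k : Nat) + 1 : Nat) : Int) = (a + k) + 1 := by push_cast; ring
        rw [e, pv_mloop_succ f a (a + k) (by omega)]
        split
        · exact Or.inr ⟨a + k, by omega, by omega, rfl⟩
        · rcases ih with h0 | ⟨d, hd1, hd2, hd3⟩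
          · exact Or.inl h0
          · exact Or.inr ⟨d, hd1, by omega, hd3⟩

theorem pv_fstfold (f : Int → Int) (l : List Int) (st : Int × Int) :
    (l.foldl (fun (st : Int × Int) d => if f d > st.1 then (f d, d) else st) st).1
      = l.foldl (fun acc d => if f d > acc then f d else acc) st.1 := by
  induction l generalizing st with
  | nil => rfl
  | cons x t ih =>
      simp only [List.foldl_cons]
      rw [ih]
      by_cases h : f x > st.1 <;> simp [h]

theorem pv_tloop_fst (f : Int → Int) (b : Int) : (pvTloop f b).1 = pvMloop f 0 b :=
  pv_fstfold f (PySem.List.pyRange 0 b 1) (0, 0)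

theorem pv_tloop_nil (f : Int → Int) (b : Int) (h : b ≤ 0) : pvTloop f b = (0, 0) := by
  simp [pvTloop, PySem.List.pyRange_one_eq_nil h]

theorem pv_tloop_succ (f : Int → Int) (b : Int) (h : 0 ≤ b) :
    pvTloop f (b + 1) = if f b > (pvTloop f b).1 then (f b, b) else pvTloop f b := by
  unfold pvTloop
  rw [PySem.List.pyRange_one_succ_right h, List.foldl_append]
  simp

theorem pv_tloop_snd (f : Int → Int) (b : Int) (hb : 0 ≤ b) :
    ((pvTloop f b).1 = 0 → (pvTloop f b).2 = 0) ∧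
    ((pvTloop f b).1 ≠ 0 →
      0 ≤ (pvTloop f b).2 ∧ (pvTloop f b).2 < b ∧ f (pvTloop f b).2 = (pvTloop f b).1 ∧
      ∀ d, 0 ≤ d → d < (pvTloop f b).2 → f d < (pvTloop f b).1) := by
  obtain ⟨k, rfl⟩ : ∃ k : Nat, b = (0 : Int) + k := ⟨b.toNat, by omega⟩
  clear hb
  induction k with
  | zero =>
      rw [pv_tloop_nil f _ (by omega)]
      exact ⟨fun _ => rfl, fun h => absurd rfl h⟩
  | succ k ih =>
      have e : ((0 : Int) + ((k : Nat) + 1 : Nat) : Int) = ((0 : Int) + k) + 1 := by push_cast; ring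
      have hfst : (pvTloop f ((0 : Int) + k)).1 = pvMloop f 0 ((0 : Int) + k) := pv_tloop_fst f _
      rw [e, pv_tloop_succ f _ (by omega)]
      split
      · rename_i hc
        have h0 : 0 ≤ pvMloop f 0 ((0 : Int) + k) := pv_mloop_nonneg f 0 _
        rw [hfst] at hc
        constructor
        · intro h
          exfalso
          have hh : f ((0 : Int) + k) = 0 := h
          omega
        · intro _
          refine ⟨?_, ?_, rfl, ?_⟩
          · show (0 : Int) ≤ (0 : Int) + k
            omega
          · show ((0 : Int) + k : Int) < ((0 : Int) + k) + 1
            omega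
          · intro d hd0 hdk
            have hdk' : d < (0 : Int) + k := hdk
            have := pv_le_mloop f 0 ((0 : Int) + k) d hd0 hdk'
            show f d < f ((0 : Int) + k)
            omega
      · rename_i hc
        obtain ⟨ih1, ih2⟩ := ih
        refine ⟨ih1, fun h => ?_⟩
        obtain ⟨p1, p2, p3, p4⟩ := ih2 h
        exact ⟨p1, by omega, p3, p4⟩

theorem pv_bloop_nil (f : Int → Int) (b : Int) (h : b ≤ 1) : pvBloop f b = (0, 0) := by
  simp [pvBloop, PySem.List.pyRange_one_eq_nil h]

theorem pv_bloop_succ (f : Int → Int) (b : Int) (h : 1 ≤ b) :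
    pvBloop f (b + 1) =
      ((if f (b - 1) > (pvBloop f b).1 then f (b - 1) else (pvBloop f b).1),
       (if (if f (b - 1) > (pvBloop f b).1 then f (b - 1) else (pvBloop f b).1) * 10 + f b
            > (pvBloop f b).2
        then (if f (b - 1) > (pvBloop f b).1 then f (b - 1) else (pvBloop f b).1) * 10 + f b
        else (pvBloop f b).2)) := by
  unfold pvBloop
  rw [PySem.List.pyRange_one_succ_right h, List.foldl_append]
  simp

theorem pv_bloop_fst (f : Int → Int) (b : Int) : (pvBloop f b).1 = pvMloop f 0 (b - 1) := by
  rcases pv_int_le_or_lt b 1 with h | h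
  · rw [pv_bloop_nil f b h, pv_mloop_nil f 0 (b - 1) (by omega)]
  · obtain ⟨k, rfl⟩ : ∃ k : Nat, b = 1 + k := ⟨(b - 1).toNat, by omega⟩
    clear h
    induction k with
    | zero => rw [pv_bloop_nil f _ (by omega), pv_mloop_nil f 0 _ (by omega)]
    | succ k ih =>
        have e : ((1 : Int) + ((k : Nat) + 1 : Nat) : Int) = ((1 : Int) + k) + 1 := by push_cast; ring
        rw [e, pv_bloop_succ f _ (by omega), ih]
        have e2 : ((1 : Int) + k) + 1 - 1 = ((1 : Int) + k - 1) + 1 := by ring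
        rw [e2, pv_mloop_succ f 0 _ (by omega)]

-- running_max_tens after the step at index b equals the prefix maximum over [0, b)
theorem pv_bloop_rm (f : Int → Int) (b : Int) (h : 1 ≤ b) :
    (if f (b - 1) > (pvBloop f b).1 then f (b - 1) else (pvBloop f b).1) = pvMloop f 0 b := by
  rw [pv_bloop_fst f b]
  have e : b = (b - 1) + 1 := by ring
  rw [show pvMloop f 0 b = pvMloop f 0 ((b - 1) + 1) from by rw [← e],
      pv_mloop_succ f 0 (b - 1) (by omega)]

theorem pv_bloop_snd_le (f : Int → Int) (b j : Int) (hj1 : 1 ≤ j) (hjb : j < b) :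
    pvMloop f 0 j * 10 + f j ≤ (pvBloop f b).2 := by
  obtain ⟨k, rfl⟩ : ∃ k : Nat, b = (j + 1) + k := ⟨(b - (j + 1)).toNat, by omega⟩
  clear hjb
  induction k with
  | zero =>
      simp only [Nat.cast_zero, add_zero]
      rw [pv_bloop_succ f j hj1]
      have hrm := pv_bloop_rm f j hj1
      rw [hrm]
      split <;> omega
  | succ k ih =>
      have e : (j + 1 + ((k : Nat) + 1 : Nat) : Int) = (j + 1 + k) + 1 := by push_cast; ring
      rw [e, pv_bloop_succ f _ (by omega)]
      split <;> omega

theorem pv_bloop_snd_cases (f : Int → Int) (b : Int) :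
    (pvBloop f b).2 = 0 ∨
    ∃ j, 1 ≤ j ∧ j < b ∧ (pvBloop f b).2 = pvMloop f 0 j * 10 + f j := by
  rcases pv_int_le_or_lt b 1 with h | h
  · rw [pv_bloop_nil f b h]; exact Or.inl rfl
  · obtain ⟨k, rfl⟩ : ∃ k : Nat, b = 1 + k := ⟨(b - 1).toNat, by omega⟩
    clear h
    induction k with
    | zero => rw [pv_bloop_nil f _ (by omega)]; exact Or.inl rfl
    | succ k ih =>
        have e : ((1 : Int) + ((k : Nat) + 1 : Nat) : Int) = ((1 : Int) + k) + 1 := by push_cast; ring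
        have hrm := pv_bloop_rm f ((1 : Int) + k) (by omega)
        rw [e, pv_bloop_succ f _ (by omega), hrm]
        split
        · exact Or.inr ⟨(1 : Int) + k, by omega, by omega, rfl⟩
        · show (pvBloop f ((1 : Int) + k)).2 = 0 ∨
            ∃ j, 1 ≤ j ∧ j < ((1 : Int) + k) + 1 ∧
              (pvBloop f ((1 : Int) + k)).2 = pvMloop f 0 j * 10 + f j
          rcases ih with h0 | ⟨j, hj1, hj2, hj3⟩
          · exact Or.inl h0
          · exact Or.inr ⟨j, hj1, by omega, hj3⟩

theorem pv_digit_char (c : Char) (h1 : '0' ≤ c) (h2 : c ≤ '9') :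
    PySem.Int.ofChars? [c] = some ((c.toNat : Int) - 48) := by
  have hl : 48 ≤ c.toNat := UInt32.le_iff_toNat_le.mp (Char.le_def.mp h1)
  have hr : c.toNat ≤ 57 := UInt32.le_iff_toNat_le.mp (Char.le_def.mp h2)
  rcases (by omega : c.toNat = 48 ∨ c.toNat = 49 ∨ c.toNat = 50 ∨ c.toNat = 51 ∨ c.toNat = 52 ∨
      c.toNat = 53 ∨ c.toNat = 54 ∨ c.toNat = 55 ∨ c.toNat = 56 ∨ c.toNat = 57) with
    h|h|h|h|h|h|h|h|h|h <;>
    (rw [← Char.ofNat_toNat c, h]; decide)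

theorem pv_digit_bounds (line : String) (hd : ∀ c ∈ line.toList, '0' ≤ c ∧ c ≤ '9')
    (d : Int) (h0 : 0 ≤ d) (h1 : d < (line.toList.length : Int)) :
    0 ≤ pvDigit line d ∧ pvDigit line d ≤ 9 := by
  unfold pvDigit
  have hidx : d = ((d.toNat : Nat) : Int) := by omega
  have hlt : d.toNat < line.toList.length := by omega
  rw [hidx, PySem.Str.pyGet?_natCast, List.getElem?_eq_getElem hlt]
  obtain ⟨hc1, hc2⟩ := hd _ (List.getElem_mem hlt)
  have hl : 48 ≤ (line.toList[d.toNat]).toNat := UInt32.le_iff_toNat_le.mp (Char.le_def.mp hc1)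
  have hr : (line.toList[d.toNat]).toNat ≤ 57 := UInt32.le_iff_toNat_le.mp (Char.le_def.mp hc2)
  rw [show ((some line.toList[d.toNat]).bind fun c => PySem.Int.ofChars? [c])
        = PySem.Int.ofChars? [line.toList[d.toNat]] from rfl,
      pv_digit_char _ hc1 hc2]
  simp only [Option.getD_some]
  omega

theorem pv_len_eq (line : String) : PySem.Str.len line = (line.toList.length : Int) := by
  simp [pysem]

theorem pv_pre_chars (line : String) (h : PySem.Str.strIsdigit line = true) :
    ∀ c ∈ line.toList, '0' ≤ c ∧ c ≤ '9' := by
  rw [PySem.Str.strIsdigit_eq] at h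
  simp only [PySem.Chars.strIsdigit, PySem.Chars.isdigit, Bool.and_eq_true, List.all_eq_true,
    decide_eq_true_eq] at h
  exact h.2

theorem pv_main (line : String) (hpre : Pre_find_best_couple line) :
    find_best_couple line = find_best_couple_alt line := by
  set f := pvDigit line with hf
  set n : Int := PySem.Str.len line with hn
  have hnlen : n = (line.toList.length : Int) := pv_len_eq line
  have hA : find_best_couple line
      = (pvTloop f (n - 1)).1 * 10 + pvMloop f ((pvTloop f (n - 1)).2 + 1) n := rfl
  have hB : find_best_couple_alt line = (pvBloop f n).2 := rfl
  rw [hA, hB]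
  rcases pv_int_le_or_lt n 1 with hsmall | hbig
  · -- length 0 or 1: every loop is empty, both sides are 0
    rw [pv_tloop_nil f (n - 1) (by omega), pv_bloop_nil f n (by omega)]
    rw [pv_mloop_nil f ((0 : Int) + 1) n (by omega)]
    ring
  · -- length ≥ 2: all characters are digits
    have hdig : ∀ c ∈ line.toList, '0' ≤ c ∧ c ≤ '9' := by
      rcases hpre with h | h
      · exfalso; omega
      · exact pv_pre_chars line h
    have hfb : ∀ d : Int, 0 ≤ d → d < n → 0 ≤ f d ∧ f d ≤ 9 := by
      intro d h0 h1
      exact pv_digit_bounds line hdig d h0 (by omega)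
    set bt := (pvTloop f (n - 1)).1 with hbt
    set bi := (pvTloop f (n - 1)).2 with hbi
    have hfst : bt = pvMloop f 0 (n - 1) := pv_tloop_fst f (n - 1)
    obtain ⟨hz, hnz⟩ := pv_tloop_snd f (n - 1) (by omega)
    rw [← hbt, ← hbi] at hz hnz
    have hbt0 : 0 ≤ bt := by rw [hfst]; exact pv_mloop_nonneg f 0 (n - 1)
    -- A ≤ B
    have h1 : bt * 10 + pvMloop f (bi + 1) n ≤ (pvBloop f n).2 := by
      rcases pv_mloop_cases f (bi + 1) n with hO | ⟨k, hk1, hk2, hk3⟩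
      · -- ones part is 0: compare with candidate j = n - 1
        rw [hO]
        have hc := pv_bloop_snd_le f n (n - 1) (by omega) (by omega)
        have := (hfb (n - 1) (by omega) (by omega)).1
        rw [← hfst] at hc
        omega
      · -- ones part is f k with bi < k < n: candidate j = k
        rw [hk3]
        have hbik : 1 ≤ k := by
          rcases eq_or_ne bt 0 with h0 | h0
          · have := hz h0; omega
          · have := (hnz h0).1; omega
        have hc := pv_bloop_snd_le f n k hbik hk2
        have hble : bt ≤ pvMloop f 0 k := by
          rcases eq_or_ne bt 0 with h0 | h0
          · rw [h0]; exact pv_mloop_nonneg f 0 k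
          · obtain ⟨hp1, hp2, hp3, _⟩ := hnz h0
            rw [← hp3]
            exact pv_le_mloop f 0 k bi hp1 (by omega)
        omega
    -- B ≤ A
    have h2 : (pvBloop f n).2 ≤ bt * 10 + pvMloop f (bi + 1) n := by
      have hO0 : 0 ≤ pvMloop f (bi + 1) n := pv_mloop_nonneg f (bi + 1) n
      rcases pv_bloop_snd_cases f n with h0 | ⟨j, hj1, hj2, hj3⟩
      · omega
      · rw [hj3]
        have hple : pvMloop f 0 j ≤ bt := by
          rw [hfst]
          exact pv_mloop_mono f 0 j (n - 1) (by omega) (by omega)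
        rcases eq_or_ne bt 0 with hb0 | hb0
        · -- all tens digits are 0, index is 0; f j ≤ the ones maximum
          have hbi0 : bi = 0 := hz hb0
          have hO : f j ≤ pvMloop f (bi + 1) n := by
            rw [hbi0]
            exact pv_le_mloop f 1 n j hj1 hj2
          have hp0 : 0 ≤ pvMloop f 0 j := pv_mloop_nonneg f 0 j
          omega
        · obtain ⟨hp1, hp2, hp3, hp4⟩ := hnz hb0
          rcases eq_or_lt_of_le hple with hpe | hpl
          · -- prefix max equals bt: then j must lie after bi
            have hjgt : bi < j := by
              by_contra hle
              rcases pv_mloop_cases f 0 j with hq | ⟨d, hd1, hd2, hd3⟩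
              · omega
              · have := hp4 d hd1 (by omega)
                omega
            have hO : f j ≤ pvMloop f (bi + 1) n := pv_le_mloop f (bi + 1) n j (by omega) hj2
            omega
          · -- strictly smaller prefix max: digit bound closes the gap
            have := (hfb j (by omega) (by omega)).2
            omega
    omega

-- ===== VERDICT (by name: the statement is the Claim_ definition above) =====
theorem find_best_couple_spec : Claim_equal_find_best_couple := by
  intro line _ hpre
  unfold Spec_find_best_couple
  exact pv_main line hpre
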